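-- pv_equiv track=rewrite | github.com/aklileseyoum/A2SV | reducing-dishes.py | maxSatisfaction
-- ===== SOURCE A (Python) =====
-- from typing import List
--
-- def maxSatisfaction(satisfaction: List[int]) -> int:
--     satisfaction.sort(reverse=True)
--     res = 0
--     presum = 0
--     for i in range(len(satisfaction)):
--         presum += satisfaction[i]
--         if presum < 0:
--             break
--         res += presum
--
--     return res
-- ===== SOURCE B (Python) =====
-- from typing import List
--
-- def maxSatisfaction(satisfaction: List[int]) -> int:
--     satisfaction.sort(reverse=True)
--     best = 0
--     for k in range(len(satisfaction) + 1):
--         total = sum((k - j) * satisfaction[j] for j in range(k))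
--         if total > best:
--             best = total
--     return best
-- ===== Notes on version B (the rewrite author's own statement) =====
-- stated objective: alternative
-- what changed: Replaces A's single greedy pass (running prefix sum with early break) by a direct brute-force maximisation: for each count k of kept dishes compute the total sum((k-j)*s[j]) from scratch and take the maximum; equivalence rests on concavity of the objective for a descending-sorted list.
import Mathlib
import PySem

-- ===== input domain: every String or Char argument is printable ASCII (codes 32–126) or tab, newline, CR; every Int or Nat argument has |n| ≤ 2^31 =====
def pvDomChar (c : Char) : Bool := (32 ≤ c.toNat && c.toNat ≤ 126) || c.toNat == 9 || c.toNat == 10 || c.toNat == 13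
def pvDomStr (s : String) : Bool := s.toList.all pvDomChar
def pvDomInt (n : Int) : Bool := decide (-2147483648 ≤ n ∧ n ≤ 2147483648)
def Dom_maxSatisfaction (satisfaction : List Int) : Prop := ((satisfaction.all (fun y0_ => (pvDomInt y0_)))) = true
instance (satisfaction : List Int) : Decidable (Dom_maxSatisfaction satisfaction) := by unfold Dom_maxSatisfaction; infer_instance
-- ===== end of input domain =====

-- B replaces A's greedy prefix-sum pass with a brute-force maximum over the number k
-- of kept dishes (objective: alternative decomposition, not faster).
-- Both Pythons sort the argument in place (identically); the equivalence proved here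
-- is about the RETURN value.

-- ===== PORT A =====
-- the for-loop of A with its early break: state (res, presum)
def pyLoopA : List Int → Int → Int → Int
  | [], res, _ => res
  | x :: t, res, presum =>
    let p := presum + x
    if p < 0 then res else pyLoopA t (res + p) p

def maxSatisfaction (satisfaction : List Int) : Int :=
  let s := PySem.List.sorted satisfaction (fun x => x) true
  pyLoopA s 0 0

-- ===== PORT B =====
-- total satisfaction when keeping the k best dishes: sum((k-j)*s[j] for j in range(k))
def totalB (s : List Int) (k : Nat) : Int :=
  ((List.range k).map (fun (j : Nat) => ((k : Int) - (j : Int)) * s.getD j 0)).sum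

-- loop body of B: best = total if total > best else best
def bstep (s : List Int) (best : Int) (k : Nat) : Int :=
  let total := totalB s k
  if total > best then total else best

def maxSatisfaction_alt (satisfaction : List Int) : Int :=
  let s := PySem.List.sorted satisfaction (fun x => x) true
  (List.range (s.length + 1)).foldl (bstep s) 0

-- ===== PRECONDITION & SPEC =====
def Spec_maxSatisfaction (satisfaction : List Int) (out : Int) : Prop := out = maxSatisfaction_alt satisfaction
instance (satisfaction : List Int) (out : Int) : Decidable (Spec_maxSatisfaction satisfaction out) := by unfold Spec_maxSatisfaction; infer_instance

-- ===== CLAIM (what is proved, stated in full; the proofs are below) =====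
def Claim_equal_maxSatisfaction : Prop := ∀ (satisfaction : List Int), Dom_maxSatisfaction satisfaction → Spec_maxSatisfaction satisfaction (maxSatisfaction satisfaction)

-- ===== LEMMAS AND PROOFS =====

-- prefix sum of the first m elements (0 beyond the end), as A's presum variable sees it
def preS (s : List Int) (m : Nat) : Int :=
  ((List.range m).map (fun j => s.getD j 0)).sum

theorem preS_succ (s : List Int) (k : Nat) : preS s (k + 1) = preS s k + s.getD k 0 := by
  simp [preS, List.range_succ]

theorem sum_map_add (l : List Nat) (f g : Nat → Int) :
    (l.map (fun x => f x + g x)).sum = (l.map f).sum + (l.map g).sum := by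
  induction l with
  | nil => simp
  | cons x t ih => simp [ih]; ring

theorem sum_map_le_const (l : List Nat) (f : Nat → Int) (c : Int)
    (h : ∀ i ∈ l, c ≤ f i) : (l.length : Int) * c ≤ (l.map f).sum := by
  induction l with
  | nil => simp
  | cons x t ih =>
    have h1 : c ≤ f x := h x (by simp)
    have h2 : (t.length : Int) * c ≤ (t.map f).sum := ih (fun i hi => h i (by simp [hi]))
    simp only [List.length_cons, List.map_cons, List.sum_cons]
    push_cast
    nlinarith

theorem totalB_succ (s : List Int) (k : Nat) :
    totalB s (k + 1) = totalB s k + preS s (k + 1) := by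
  unfold totalB preS
  have hf : (fun j : Nat => (((k + 1 : Nat) : Int) - (j : Int)) * s.getD j 0)
      = fun j : Nat => ((k : Int) - (j : Int)) * s.getD j 0 + s.getD j 0 := by
    funext j; push_cast; ring
  rw [hf, sum_map_add]
  rw [List.range_succ, List.map_append, List.sum_append]
  simp

theorem getD_mono (s : List Int) (hs : s.Pairwise (fun a b => b ≤ a))
    (i j : Nat) (hij : i ≤ j) (hj : j < s.length) : s.getD j 0 ≤ s.getD i 0 := by
  have hi : i < s.length := lt_of_le_of_lt hij hj
  rcases lt_or_eq_of_le hij with h | h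
  · have := (List.pairwise_iff_getElem.mp hs) i j hi hj h
    rwa [List.getD_eq_getElem s 0 hj, List.getD_eq_getElem s 0 hi]
  · subst h; exact le_refl _

theorem neg_step (s : List Int) (hs : s.Pairwise (fun a b => b ≤ a))
    (k : Nat) (hk1 : 1 ≤ k) (hk : k < s.length) (hneg : preS s k < 0) :
    preS s (k + 1) < 0 := by
  have hmin : (k : Int) * s.getD (k - 1) 0 ≤ preS s k := by
    have := sum_map_le_const (List.range k) (fun j => s.getD j 0) (s.getD (k - 1) 0)
      (fun i hi => getD_mono s hs i (k - 1) (by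
        have := List.mem_range.mp hi; omega) (by omega))
    simpa [preS] using this
  have hlast : s.getD (k - 1) 0 < 0 := by
    by_contra h
    push_neg at h
    have : (0 : Int) ≤ (k : Int) * s.getD (k - 1) 0 :=
      mul_nonneg (by exact_mod_cast Nat.zero_le k) h
    omega
  have hk2 : s.getD k 0 ≤ s.getD (k - 1) 0 := getD_mono s hs (k - 1) k (by omega) hk
  rw [preS_succ]
  omega

theorem neg_all (s : List Int) (hs : s.Pairwise (fun a b => b ≤ a))
    (j : Nat) (hj1 : 1 ≤ j) (hjneg : preS s j < 0) :
    ∀ k, j ≤ k → k ≤ s.length → preS s k < 0 := by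
  intro k
  induction k with
  | zero => intro h1 _; omega
  | succ k ih =>
    intro h1 h2
    rcases Nat.lt_or_ge j (k + 1) with h | h
    · exact neg_step s hs k (by omega) (by omega) (ih (by omega) (by omega))
    · have : j = k + 1 := by omega
      subst this; exact hjneg

theorem totalB_le (s : List Int) (hs : s.Pairwise (fun a b => b ≤ a))
    (k0 : Nat) (hk0 : k0 + 1 ≤ s.length) (hneg : preS s (k0 + 1) < 0) :
    ∀ k, k0 ≤ k → k ≤ s.length → totalB s k ≤ totalB s k0 := by
  intro k
  induction k with
  | zero => intro h1 _; have : k0 = 0 := by omega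
            subst this; exact le_refl _
  | succ k ih =>
    intro h1 h2
    rcases Nat.lt_or_ge k0 (k + 1) with h | h
    · have hk : totalB s k ≤ totalB s k0 := ih (by omega) (by omega)
      have hp : preS s (k + 1) < 0 :=
        neg_all s hs (k0 + 1) (by omega) hneg (k + 1) (by omega) h2
      rw [totalB_succ]
      omega
    · have : k0 = k + 1 := by omega
      subst this; exact le_refl _

theorem fold_stay (s : List Int) (l : List Nat) (b : Int)
    (h : ∀ k ∈ l, totalB s k ≤ b) : l.foldl (bstep s) b = b := by
  induction l with
  | nil => rfl
  | cons x t ih =>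
    have hx : totalB s x ≤ b := h x (by simp)
    have hb : bstep s b x = b := by
      unfold bstep
      simp only []
      split_ifs with hgt
      · omega
      · rfl
    rw [List.foldl_cons, hb]
    exact ih (fun k hk => h k (by simp [hk]))

theorem loopA_inv (s : List Int) (hs : s.Pairwise (fun a b => b ≤ a)) :
    ∀ (d k0 : Nat), k0 + d = s.length →
      pyLoopA (s.drop k0) (totalB s k0) (preS s k0)
        = (List.range' (k0 + 1) d).foldl (bstep s) (totalB s k0) := by
  intro d
  induction d with
  | zero =>
    intro k0 hk
    have : s.drop k0 = [] := by
      apply List.drop_eq_nil_of_le; omega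
    rw [this]
    rfl
  | succ d ih =>
    intro k0 hk
    have hk0 : k0 < s.length := by omega
    have hdrop : s.drop k0 = s[k0] :: s.drop (k0 + 1) :=
      (List.getElem_cons_drop hk0).symm
    have hgetD : s.getD k0 0 = s[k0] := List.getD_eq_getElem s 0 hk0
    have hp : preS s k0 + s[k0] = preS s (k0 + 1) := by rw [preS_succ, hgetD]
    rw [hdrop]
    show (if preS s k0 + s[k0] < 0 then totalB s k0
          else pyLoopA (s.drop (k0+1)) (totalB s k0 + (preS s k0 + s[k0])) (preS s k0 + s[k0]))
        = (List.range' (k0 + 1) (d + 1)).foldl (bstep s) (totalB s k0)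
    rw [hp]
    by_cases hneg : preS s (k0 + 1) < 0
    · rw [if_pos hneg]
      symm
      apply fold_stay
      intro k hkmem
      have hm := List.mem_range'_1.mp hkmem
      exact totalB_le s hs k0 (by omega) hneg k (by omega) (by omega)
    · rw [if_neg hneg]
      push_neg at hneg
      have hstep : totalB s k0 + preS s (k0 + 1) = totalB s (k0 + 1) :=
        (totalB_succ s k0).symm
      rw [hstep]
      have hrange : List.range' (k0 + 1) (d + 1) = (k0 + 1) :: List.range' (k0 + 2) d := by
        rw [List.range'_succ]
      rw [hrange, List.foldl_cons]
      have hb : bstep s (totalB s k0) (k0 + 1) = totalB s (k0 + 1) := by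
        unfold bstep
        simp only []
        have : totalB s k0 ≤ totalB s (k0 + 1) := by
          rw [totalB_succ]; omega
        split_ifs with hgt
        · rfl
        · omega
      rw [hb]
      exact ih (k0 + 1) (by omega)

theorem main_eq (s : List Int) (hs : s.Pairwise (fun a b => b ≤ a)) :
    pyLoopA s 0 0 = (List.range (s.length + 1)).foldl (bstep s) 0 := by
  have h0 : totalB s 0 = 0 := by simp [totalB]
  have hpre0 : preS s 0 = 0 := by simp [preS]
  have hinv := loopA_inv s hs s.length 0 (by omega)
  rw [List.drop_zero, h0, hpre0] at hinv
  have hrange : List.range (s.length + 1) = 0 :: List.range' 1 s.length := by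
    rw [List.range_eq_range', List.range'_succ]
  rw [hrange, List.foldl_cons]
  have hb0 : bstep s 0 0 = 0 := by
    unfold bstep
    simp [h0]
  rw [hb0]
  exact hinv

-- ===== VERDICT (by name: the statement is the Claim_ definition above) =====
theorem maxSatisfaction_spec : Claim_equal_maxSatisfaction := by
  intro satisfaction _
  unfold Spec_maxSatisfaction maxSatisfaction maxSatisfaction_alt
  exact main_eq _ (PySem.List.sorted_pairwise_rev satisfaction (fun x => x))
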